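-- pv_equiv track=rewrite | github.com/Bejarano03/arithmetic_geometric_genarator | Script.py | generate_arithmetic
-- ===== SOURCE A (Python) =====
-- def generate_arithmetic(first_term, common_diff, num_terms):
--     if num_terms <= 0:
--         return [], 0
--
--     sequence = []
--     for i in range(num_terms):
--         term = first_term + (i * common_diff)
--         sequence.append(term)
--
--     sequence_sum = sum(sequence)
--     return sequence, sequence_sum
-- ===== SOURCE B (Python) =====
-- def generate_arithmetic(first_term, common_diff, num_terms):
--     # Build the sequence BACK-TO-FRONT by the additive recurrence term -= common_diff
--     # (no per-term multiplication), then reverse once; the sum is accumulated along the way.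
--     count = max(num_terms, 0)
--     rev = []
--     total = 0
--     term = first_term + (count - 1) * common_diff  # last term of the sequence
--     for _ in range(count):
--         rev.append(term)
--         total += term
--         term -= common_diff
--     rev.reverse()
--     return rev, total
-- ===== Notes on version B (the rewrite author's own statement) =====
-- stated objective: alternative
-- what changed: B builds the sequence back-to-front from the closed-form last term via the additive recurrence term -= common_diff (no per-index multiplication), accumulating the sum as it goes, then reverses once; A builds front-to-back with first_term + i*common_diff per index and sums in a separate pass.
import Mathlib
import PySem

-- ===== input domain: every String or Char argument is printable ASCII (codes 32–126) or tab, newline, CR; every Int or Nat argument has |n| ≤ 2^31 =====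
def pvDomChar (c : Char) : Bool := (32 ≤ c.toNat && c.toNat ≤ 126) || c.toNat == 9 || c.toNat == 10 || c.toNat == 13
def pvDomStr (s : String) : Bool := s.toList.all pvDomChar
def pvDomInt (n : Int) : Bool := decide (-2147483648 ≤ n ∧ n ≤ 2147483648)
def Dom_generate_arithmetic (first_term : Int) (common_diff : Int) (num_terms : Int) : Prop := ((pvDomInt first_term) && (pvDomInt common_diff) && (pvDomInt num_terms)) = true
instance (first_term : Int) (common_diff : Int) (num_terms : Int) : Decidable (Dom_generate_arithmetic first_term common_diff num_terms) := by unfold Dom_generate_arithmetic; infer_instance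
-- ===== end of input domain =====

-- B builds the sequence back-to-front from the last term by the recurrence term -= common_diff
-- (summing as it goes) and reverses once, instead of A's front-to-back per-index multiplication
-- plus separate sum() pass (objective: alternative).

-- ===== PORT A =====
def generate_arithmetic (first_term : Int) (common_diff : Int) (num_terms : Int) : List Int × Int :=
  if num_terms ≤ 0 then ([], 0)
  else
    let sequence : List Int :=
      (PySem.List.pyRange 0 num_terms 1).foldl
        (fun seq i => seq ++ [first_term + i * common_diff]) []
    let sequence_sum : Int := sequence.foldl (· + ·) 0   -- sum(sequence)
    (sequence, sequence_sum)

-- ===== PORT B =====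
def generate_arithmetic_alt (first_term : Int) (common_diff : Int) (num_terms : Int) : List Int × Int :=
  let count := max num_terms 0
  -- loop over range(count), state (rev, total, term); the loop variable is unused
  let res :=
    (PySem.List.pyRange 0 count 1).foldl
      (fun (st : List Int × Int × Int) _ =>
        (st.1 ++ [st.2.2], st.2.1 + st.2.2, st.2.2 - common_diff))
      ([], 0, first_term + (count - 1) * common_diff)
  (res.1.reverse, res.2.1)

-- ===== PRECONDITION & SPEC =====
def Spec_generate_arithmetic (first_term : Int) (common_diff : Int) (num_terms : Int) (out : List Int × Int) : Prop := out = generate_arithmetic_alt first_term common_diff num_terms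
instance (first_term : Int) (common_diff : Int) (num_terms : Int) (out : List Int × Int) : Decidable (Spec_generate_arithmetic first_term common_diff num_terms out) := by unfold Spec_generate_arithmetic; infer_instance

-- ===== CLAIM =====
def Claim_equal_generate_arithmetic : Prop := ∀ (first_term : Int) (common_diff : Int) (num_terms : Int), Dom_generate_arithmetic first_term common_diff num_terms → Spec_generate_arithmetic first_term common_diff num_terms (generate_arithmetic first_term common_diff num_terms)

-- ===== LEMMAS AND PROOFS =====

-- the descending list [t, t-d, …, t-(k-1)d]
def pvDesc (d : Int) (k : Nat) (t : Int) : List Int :=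
  (List.range k).map (fun j : Nat => t - (j : Int) * d)

theorem pvDesc_succ (d : Int) (k : Nat) (t : Int) :
    pvDesc d (k + 1) t = t :: pvDesc d k (t - d) := by
  simp only [pvDesc, List.range_succ_eq_map, List.map_cons, List.map_map]
  congr 1
  · simp
  · apply List.map_congr_left; intro j _; simp only [Function.comp_apply]; push_cast; ring

theorem pvDesc_snoc (d : Int) (k : Nat) (t : Int) :
    pvDesc d (k + 1) t = pvDesc d k t ++ [t - k * d] := by
  simp [pvDesc, List.range_succ]

-- B's loop: fold over any list of length k yields the descending list, its sum and the stepped term.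
theorem pv_fold_desc (d : Int) :
    ∀ (l : List Int) (r : List Int) (s t : Int),
      l.foldl (fun (st : List Int × Int × Int) _ =>
          (st.1 ++ [st.2.2], st.2.1 + st.2.2, st.2.2 - d)) (r, s, t)
        = (r ++ pvDesc d l.length t, s + (pvDesc d l.length t).sum, t - l.length * d) := by
  intro l
  induction l with
  | nil => intro r s t; simp [pvDesc]
  | cons x xs ih =>
    intro r s t
    simp only [List.foldl_cons, List.length_cons, ih, pvDesc_succ]
    refine Prod.ext ?_ (Prod.ext ?_ ?_) <;> simp <;> ring

-- the ascending list reversed is the descending list from the last term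
theorem pv_asc_reverse (d : Int) :
    ∀ (k : Nat) (a : Int),
      ((List.range k).map (fun i : Nat => a + (i : Int) * d)).reverse
        = pvDesc d k (a + ((k : Int) - 1) * d) := by
  intro k
  induction k with
  | zero => intro a; simp [pvDesc]
  | succ k ih =>
    intro a
    have h1 : (List.range (k + 1)).map (fun i : Nat => a + (i : Int) * d)
        = a :: (List.range k).map (fun i : Nat => (a + d) + (i : Int) * d) := by
      simp only [List.range_succ_eq_map, List.map_cons, List.map_map]
      congr 1
      · simp
      · apply List.map_congr_left; intro j _; simp only [Function.comp_apply]; push_cast; ring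
    have h2 : a + d + ((k : Int) - 1) * d = a + ((k : Int) + 1 - 1) * d - (k : Int) * d + (k:Int) * d := by ring
    rw [h1, List.reverse_cons, ih (a + d)]
    rw [pvDesc_snoc]
    congr 1
    · congr 1; push_cast; ring
    · congr 1; push_cast; ring

-- A's list-building loop appends the mapped terms.
theorem pv_foldl_append (f : Int → Int) :
    ∀ (l : List Int) (s : List Int),
      l.foldl (fun seq i => seq ++ [f i]) s = s ++ l.map f := by
  intro l
  induction l with
  | nil => simp
  | cons x xs ih => intro s; simp [List.foldl, ih]

-- foldl (+) computes the sum.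
theorem pv_foldl_sum : ∀ (l : List Int) (t : Int), l.foldl (· + ·) t = t + l.sum := by
  intro l
  induction l with
  | nil => simp
  | cons x xs ih => intro t; simp [List.foldl, ih]; ring

-- ===== VERDICT =====
theorem generate_arithmetic_spec : Claim_equal_generate_arithmetic := by
  intro a d n _
  show generate_arithmetic a d n = generate_arithmetic_alt a d n
  unfold generate_arithmetic generate_arithmetic_alt
  by_cases h : n ≤ 0
  · have hm : max n 0 = 0 := by omega
    simp [h, PySem.List.pyRange_one_eq_nil (by omega : (0:Int) ≤ 0)]
  · have hm : max n 0 = n := by omega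
    have hlen : (PySem.List.pyRange 0 n 1).length = n.toNat := by
      simp [PySem.List.length_pyRange_one]
    simp only [h, if_false, hm]
    rw [pv_foldl_append (fun i => a + i * d), pv_foldl_sum,
        pv_fold_desc d (PySem.List.pyRange 0 n 1), hlen]
    have hasc : (PySem.List.pyRange 0 n 1).map (fun i => a + i * d)
        = (List.range n.toNat).map (fun i : Nat => a + (i : Int) * d) := by
      rw [PySem.List.pyRange_one, List.map_map]
      have : (n - 0).toNat = n.toNat := by norm_num
      rw [this]
      apply List.map_congr_left; intro j _; simp [Function.comp]
    have hcast : ((n.toNat : Int)) = n := Int.toNat_of_nonneg (by omega)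
    have hrev : ((List.range n.toNat).map (fun i : Nat => a + (i : Int) * d)).reverse
        = pvDesc d n.toNat (a + (n - 1) * d) := by
      rw [pv_asc_reverse d n.toNat a, hcast]
    refine Prod.ext ?_ ?_
    · simp only [hasc, List.nil_append]
      rw [← hrev, List.reverse_reverse]
    · simp only [hasc, List.nil_append]
      rw [← hrev, List.sum_reverse]
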